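-- pv_equiv track=rewrite | github.com/AtlantixJJ/style-based-gan-pytorch | script/sample/run.py | command_sample_real
-- ===== SOURCE A (Python) =====
-- def command_sample_real(gpus):
--     count = 0
--     basecmd = "python script/sample/msreal.py --n-iter 1600 --n-total 16 --image ../datasets/CelebAMask-HQ/CelebA-HQ-img/%d.jpg --label ../datasets/CelebAMask-HQ/CelebAMask-HQ-mask-15/%d.png --gpu %d --method %s --outdir results/mask_sample_real_method"
--     for i in range(10):
--         for method in ["ML", "GL", "EL", "LL"]:
--             idx = count % len(gpus)
--             yield idx, basecmd % (i, i, gpus[idx], method)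
--             count += 1
-- ===== SOURCE B (Python) =====
-- def command_sample_real(gpus):
--     basecmd = "python script/sample/msreal.py --n-iter 1600 --n-total 16 --image ../datasets/CelebAMask-HQ/CelebA-HQ-img/%d.jpg --label ../datasets/CelebAMask-HQ/CelebAMask-HQ-mask-15/%d.png --gpu %d --method %s --outdir results/mask_sample_real_method"
--     methods = ["ML", "GL", "EL", "LL"]
--     for pos in range(10 * len(methods)):
--         i, m = divmod(pos, len(methods))
--         idx = pos % len(gpus)
--         yield idx, basecmd % (i, i, gpus[idx], methods[m])
-- ===== Notes on version B (the rewrite author's own statement) =====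
-- stated objective: alternative
-- what changed: Replaced the nested loops and mutable count accumulator by a single loop over a flat position range, recovering (i, method) by divmod index arithmetic and the gpu index directly as pos % len(gpus).
import Mathlib
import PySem

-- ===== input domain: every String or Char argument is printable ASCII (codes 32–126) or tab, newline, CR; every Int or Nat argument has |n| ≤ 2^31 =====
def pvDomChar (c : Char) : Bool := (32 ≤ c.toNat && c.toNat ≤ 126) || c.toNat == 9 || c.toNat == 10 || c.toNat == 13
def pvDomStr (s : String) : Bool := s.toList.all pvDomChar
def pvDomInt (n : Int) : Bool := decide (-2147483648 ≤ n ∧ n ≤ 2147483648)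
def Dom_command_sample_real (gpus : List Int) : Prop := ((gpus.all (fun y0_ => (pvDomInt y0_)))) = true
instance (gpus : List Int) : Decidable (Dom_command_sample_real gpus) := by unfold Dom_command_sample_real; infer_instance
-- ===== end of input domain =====

-- B replaces A's nested loops with a mutable count accumulator by a single flat loop
-- over positions 0..39, recovering (i, method) via divmod index arithmetic (alternative
-- decomposition); equivalence is about the sequence of yielded values, materialised as a list.

-- basecmd % (i, i, gpu, method): exact port of Python's %d/%s interpolation for this fixed format string
def pvFmt (i gpu : Int) (method : String) : String :=
  "python script/sample/msreal.py --n-iter 1600 --n-total 16 --image ../datasets/CelebAMask-HQ/CelebA-HQ-img/"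
    ++ PySem.Int.toStr i ++ ".jpg --label ../datasets/CelebAMask-HQ/CelebAMask-HQ-mask-15/"
    ++ PySem.Int.toStr i ++ ".png --gpu " ++ PySem.Int.toStr gpu ++ " --method " ++ method
    ++ " --outdir results/mask_sample_real_method"

-- ===== PORT A =====
def command_sample_real (gpus : List Int) : List (Int × String) :=
  ((PySem.List.pyRange 0 10 1).foldl (fun (st : List (Int × String) × Int) i =>
      (["ML", "GL", "EL", "LL"] : List String).foldl (fun st method =>
        (st.1 ++ [(PySem.Int.mod st.2 (gpus.length : Int),
                   pvFmt i (PySem.List.pyGetD gpus (PySem.Int.mod st.2 (gpus.length : Int)) 0) method)],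
         st.2 + 1)) st)
    ([], 0)).1

-- ===== PORT B =====
def command_sample_real_alt (gpus : List Int) : List (Int × String) :=
  (PySem.List.pyRange 0 (10 * (["ML", "GL", "EL", "LL"] : List String).length) 1).map (fun pos =>
    let i := PySem.Int.floordiv pos ((["ML", "GL", "EL", "LL"] : List String).length : Int)
    let m := PySem.Int.mod pos ((["ML", "GL", "EL", "LL"] : List String).length : Int)
    let idx := PySem.Int.mod pos (gpus.length : Int)
    (idx, pvFmt i (PySem.List.pyGetD gpus idx 0)
          (PySem.List.pyGetD (["ML", "GL", "EL", "LL"] : List String) m "")))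

-- ===== PRECONDITION & SPEC =====
-- Pre_: gpus must be nonempty — on [] the Python A raises ZeroDivisionError at 'count % len(gpus)'.
def Pre_command_sample_real (gpus : List Int) : Prop := gpus ≠ []
instance (gpus : List Int) : Decidable (Pre_command_sample_real gpus) := by unfold Pre_command_sample_real; infer_instance
def pvWitness_command_sample_real : List Int := ([2, 5])
def Spec_command_sample_real (gpus : List Int) (out : List (Int × String)) : Prop := out = command_sample_real_alt gpus
instance (gpus : List Int) (out : List (Int × String)) : Decidable (Spec_command_sample_real gpus out) := by unfold Spec_command_sample_real; infer_instance

-- ===== CLAIM (what is proved, stated in full; the proofs are below) =====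
def Claim_equal_command_sample_real : Prop := ∀ (gpus : List Int), Dom_command_sample_real gpus → Pre_command_sample_real gpus → Spec_command_sample_real gpus (command_sample_real gpus)

-- ===== LEMMAS AND PROOFS =====

-- the counter-carrying fold over any list equals the enumeration map (A's loop invariant)
theorem pvFoldEnum {α β : Type} (f : Int → α → β) :
    ∀ (xs : List α) (acc : List β) (c : Int),
      (xs.foldl (fun (st : List β × Int) x => (st.1 ++ [f st.2 x], st.2 + 1)) (acc, c)).1
        = acc ++ (PySem.List.enumerate xs c).map (fun p => f p.1 p.2)
  | [], acc, c => by simp [PySem.List.enumerate]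
  | x :: xs, acc, c => by
      rw [List.foldl_cons, PySem.List.enumerate_cons, pvFoldEnum f xs (acc ++ [f c x]) (c + 1)]
      simp

-- ===== VERDICT (by name: the statement is the Claim_ definition above) =====
set_option maxHeartbeats 2000000 in
theorem command_sample_real_spec : Claim_equal_command_sample_real := by
  intro gpus _ _
  unfold Spec_command_sample_real command_sample_real command_sample_real_alt
  have h1 : ∀ (st : List (Int × String) × Int) (i : Int),
      (["ML", "GL", "EL", "LL"] : List String).foldl (fun st method =>
        (st.1 ++ [(PySem.Int.mod st.2 (gpus.length : Int),
                   pvFmt i (PySem.List.pyGetD gpus (PySem.Int.mod st.2 (gpus.length : Int)) 0) method)],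
         st.2 + 1)) st
      = ((["ML", "GL", "EL", "LL"] : List String).map (fun m => (i, m))).foldl
          (fun (st : List (Int × String) × Int) p =>
            (st.1 ++ [(PySem.Int.mod st.2 (gpus.length : Int),
                       pvFmt p.1 (PySem.List.pyGetD gpus (PySem.Int.mod st.2 (gpus.length : Int)) 0) p.2)],
             st.2 + 1)) st := by
    intro st i; rw [List.foldl_map]
  simp only [h1]
  rw [← List.foldl_flatMap]
  rw [pvFoldEnum
    (fun c (p : Int × String) => (PySem.Int.mod c (gpus.length : Int),
      pvFmt p.1 (PySem.List.pyGetD gpus (PySem.Int.mod c (gpus.length : Int)) 0) p.2))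
    ((PySem.List.pyRange 0 10 1).flatMap
      (fun i => (["ML", "GL", "EL", "LL"] : List String).map (fun m => (i, m)))) [] 0]
  have h10 : List.range (Int.toNat 10) = [0,1,2,3,4,5,6,7,8,9] := by decide
  have h40 : List.range (Int.toNat 40)
      = [0,1,2,3,4,5,6,7,8,9,10,11,12,13,14,15,16,17,18,19,
         20,21,22,23,24,25,26,27,28,29,30,31,32,33,34,35,36,37,38,39] := by decide
  norm_num [PySem.List.pyRange_one, h10, h40, PySem.List.enumerate, PySem.Int.floordiv,
    PySem.Int.mod, PySem.List.pyGetD, PySem.List.pyGet?, PySem.List.pyIdx?,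
    Int.fmod, Int.fdiv]
  and_intros <;> rfl
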